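-- pv_equiv track=rewrite | github.com/pasicdino/Pizza | controller.py | password_complexity
-- ===== SOURCE A (Python) =====
-- def password_complexity(password):
--     message = []
--
--     if len(password) < 6:
--         message.append("length should be at least 6<br/>")
--
--     if len(password) > 20:
--         message.append("length should be not be greater than 20<br/>")
--
--     if not any(char.isdigit() for char in password):
--         message.append("Password should have at least one numeral<br/>")
--
--     if not any(char.isupper() for char in password):
--         message.append("Password should have at least one uppercase letter<br/>")
--
--     if not any(char.islower() for char in password):
--         message.append("Password should have at least one lowercase letter<br/>")
--
--     if message:
--         return message
--     else:
--         return False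
-- ===== SOURCE B (Python) =====
-- def password_complexity(password):
--     # single pass over the characters maintaining three flags
--     has_digit = has_upper = has_lower = False
--     for char in password:
--         if char.isdigit():
--             has_digit = True
--         if char.isupper():
--             has_upper = True
--         if char.islower():
--             has_lower = True
--
--     message = []
--     if len(password) < 6:
--         message.append("length should be at least 6<br/>")
--     if len(password) > 20:
--         message.append("length should be not be greater than 20<br/>")
--     if not has_digit:
--         message.append("Password should have at least one numeral<br/>")
--     if not has_upper:
--         message.append("Password should have at least one uppercase letter<br/>")
--     if not has_lower:
--         message.append("Password should have at least one lowercase letter<br/>")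
--     return message if message else False
-- ===== Notes on version B (the rewrite author's own statement) =====
-- stated objective: alternative
-- what changed: B computes has_digit/has_upper/has_lower in a single pass over the characters with three flag accumulators instead of A's three separate any() scans, then assembles the same messages.
import Mathlib
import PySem

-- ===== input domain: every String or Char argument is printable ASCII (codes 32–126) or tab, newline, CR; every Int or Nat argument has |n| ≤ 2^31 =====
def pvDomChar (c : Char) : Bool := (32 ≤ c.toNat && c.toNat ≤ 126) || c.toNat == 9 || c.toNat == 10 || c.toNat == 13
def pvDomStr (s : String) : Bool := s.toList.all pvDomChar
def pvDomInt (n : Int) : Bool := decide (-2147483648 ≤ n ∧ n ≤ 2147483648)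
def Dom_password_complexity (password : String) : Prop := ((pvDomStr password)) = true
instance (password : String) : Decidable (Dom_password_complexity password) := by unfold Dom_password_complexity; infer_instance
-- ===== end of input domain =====

-- ===== PORT A =====
-- Port of A: message built by successive conditional appends, each condition a
-- separate any-scan over the characters, 'return False' ported as none.
def password_complexity (password : String) : Option (List String) :=
  let cs := password.toList
  let message : List String := []
  let message := if cs.length < 6 then message ++ ["length should be at least 6<br/>"] else message
  let message := if cs.length > 20 then message ++ ["length should be not be greater than 20<br/>"] else message
  let message := if ¬ (cs.any PySem.Chars.isdigit) then message ++ ["Password should have at least one numeral<br/>"] else message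
  let message := if ¬ (cs.any PySem.Chars.isupper) then message ++ ["Password should have at least one uppercase letter<br/>"] else message
  let message := if ¬ (cs.any PySem.Chars.islower) then message ++ ["Password should have at least one lowercase letter<br/>"] else message
  if message ≠ [] then some message else none

-- ===== PORT B =====
-- Port of B: ONE fold over the characters maintaining three Bool flags, then the
-- message list assembled as a concatenation of conditional singletons.
def password_complexity_alt (password : String) : Option (List String) :=
  let cs := password.toList
  let flags := cs.foldl
    (fun (f : Bool × Bool × Bool) c =>
      (f.1 || PySem.Chars.isdigit c, f.2.1 || PySem.Chars.isupper c, f.2.2 || PySem.Chars.islower c))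
    (false, false, false)
  let message : List String :=
    (if cs.length < 6 then ["length should be at least 6<br/>"] else []) ++
    (if cs.length > 20 then ["length should be not be greater than 20<br/>"] else []) ++
    (if !flags.1 then ["Password should have at least one numeral<br/>"] else []) ++
    (if !flags.2.1 then ["Password should have at least one uppercase letter<br/>"] else []) ++
    (if !flags.2.2 then ["Password should have at least one lowercase letter<br/>"] else [])
  if message = [] then none else some message

-- ===== PRECONDITION & SPEC =====
def Spec_password_complexity (password : String) (out : Option (List String)) : Prop := out = password_complexity_alt password
instance (password : String) (out : Option (List String)) : Decidable (Spec_password_complexity password out) := by unfold Spec_password_complexity; infer_instance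

-- ===== CLAIM (what is proved, stated in full; the proofs are below) =====
def Claim_equal_password_complexity : Prop := ∀ (password : String), Dom_password_complexity password → Spec_password_complexity password (password_complexity password)

-- ===== LEMMAS AND PROOFS =====

-- ===== VERDICT (by name: the statement is the Claim_ definition above) =====
-- The single-pass flag fold computes exactly the three any-scans.
theorem flags_eq (cs : List Char) :
    cs.foldl (fun (f : Bool × Bool × Bool) c =>
      (f.1 || PySem.Chars.isdigit c, f.2.1 || PySem.Chars.isupper c, f.2.2 || PySem.Chars.islower c))
      (false, false, false)
    = (cs.any PySem.Chars.isdigit, cs.any PySem.Chars.isupper, cs.any PySem.Chars.islower) := by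
  suffices h : ∀ d u l : Bool, cs.foldl (fun (f : Bool × Bool × Bool) c =>
      (f.1 || PySem.Chars.isdigit c, f.2.1 || PySem.Chars.isupper c, f.2.2 || PySem.Chars.islower c))
      (d, u, l)
    = (d || cs.any PySem.Chars.isdigit, u || cs.any PySem.Chars.isupper, l || cs.any PySem.Chars.islower) by
    simpa using h false false false
  induction cs with
  | nil => simp
  | cons c cs ih => intro d u l; simp [List.foldl, ih, Bool.or_assoc]

theorem chain_eq (c1 c2 c3 c4 c5 : Prop) [Decidable c1] [Decidable c2] [Decidable c3]
    [Decidable c4] [Decidable c5] (a1 a2 a3 a4 a5 : String) :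
    (let m : List String := []
     let m := if c1 then m ++ [a1] else m
     let m := if c2 then m ++ [a2] else m
     let m := if c3 then m ++ [a3] else m
     let m := if c4 then m ++ [a4] else m
     let m := if c5 then m ++ [a5] else m
     m)
    = (if c1 then [a1] else []) ++ (if c2 then [a2] else []) ++ (if c3 then [a3] else [])
      ++ (if c4 then [a4] else []) ++ (if c5 then [a5] else []) := by
  split_ifs <;> simp

theorem password_complexity_spec : Claim_equal_password_complexity := by
  intro password _
  unfold Spec_password_complexity password_complexity password_complexity_alt
  simp only [flags_eq, chain_eq]
  by_cases h1 : password.toList.length < 6 <;>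
    by_cases h2 : password.toList.length > 20 <;>
      cases hd : password.toList.any PySem.Chars.isdigit <;>
        cases hu : password.toList.any PySem.Chars.isupper <;>
          cases hl : password.toList.any PySem.Chars.islower <;>
            simp [String.length_toList] at h1 h2 <;> simp [h1, h2, hd, hu, hl]
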